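-- pv_equiv track=rewrite | github.com/fraktc/sts_optimization | .github/check_solution_json.py | fatal_errors
-- ===== SOURCE A (Python) =====
-- def get_elements(solution, list_condition_funct, n=None):
--     elements = []
--     if list_condition_funct(solution, n):
--         elements += solution
--     else:
--         for sol in solution:
--             elements += get_elements(sol, list_condition_funct, n)
--     return elements
--
-- def get_teams(solution):
--     return get_elements(solution, lambda s,n: all([type(i) == int for i in s]))
--
-- def fatal_errors(solution):
--     fatal_errors = []
--
--     if len(solution) == 0:
--         fatal_errors.append('The solution cannot be empty')
--         return fatal_errors
--
--     teams = get_teams(solution)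
--     n = max(teams)
--
--     if any([t not in set(teams) for t in range(1,n+1)]):
--         fatal_errors.append(f'Missing team in the solution or team out of range!!!')
--
--     if n%2 != 0:
--         fatal_errors.append(f'"n" should be even!!!')
--
--     if len(solution) != n//2:
--         fatal_errors.append(f'the number of periods is not compliant!!!')
--
--     if any([len(s) != n - 1 for s in solution]):
--         fatal_errors.append(f'the number of weeks is not compliant!!!')
--
--
--     return fatal_errors
-- ===== SOURCE B (Python) =====
-- def fatal_errors(solution):
--     if not solution:
--         return ['The solution cannot be empty']
--
--     teams = [t for period in solution for week in period for t in week]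
--     n = max(teams)
--     present = set(teams)
--
--     checks = [
--         (any(t not in present for t in range(1, n + 1)),
--          'Missing team in the solution or team out of range!!!'),
--         (n % 2 != 0,
--          '"n" should be even!!!'),
--         (len(solution) != n // 2,
--          'the number of periods is not compliant!!!'),
--         (any(len(period) != n - 1 for period in solution),
--          'the number of weeks is not compliant!!!'),
--     ]
--     return [msg for cond, msg in checks if cond]
-- ===== Notes on version B (the rewrite author's own statement) =====
-- stated objective: faster
-- what changed: B replaces the recursive get_elements flatten with a single nested comprehension, builds the membership set once instead of A's set(teams) rebuilt for every t in range(1,n+1), and emits errors from a (condition, message) table instead of an append-if chain.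
import Mathlib
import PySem

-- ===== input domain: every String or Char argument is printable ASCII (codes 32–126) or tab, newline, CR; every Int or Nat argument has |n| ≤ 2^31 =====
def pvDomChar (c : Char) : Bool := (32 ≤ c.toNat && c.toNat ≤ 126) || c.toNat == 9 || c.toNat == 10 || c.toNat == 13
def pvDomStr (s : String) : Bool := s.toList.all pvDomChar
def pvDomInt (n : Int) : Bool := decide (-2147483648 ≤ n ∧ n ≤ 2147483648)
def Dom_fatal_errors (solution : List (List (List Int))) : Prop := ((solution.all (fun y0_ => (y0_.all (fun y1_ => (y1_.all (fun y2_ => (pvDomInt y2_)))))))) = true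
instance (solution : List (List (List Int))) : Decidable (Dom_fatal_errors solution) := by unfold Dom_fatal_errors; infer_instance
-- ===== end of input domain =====

-- B replaces the recursive get_elements flatten by a single comprehension, precomputes the
-- membership set once (A rebuilds set(teams) for every t of range(1,n+1)), and emits the
-- error messages from a (condition, message) table; objective: faster (constant/asymptotic
-- mechanism in the membership pass) and simpler.

-- ===== PORT A =====
-- get_elements specialised to the three typed levels of List (List (List Int)).
-- At the innermost level the Python leaf test all(type(i)==int for i in s) is true for
-- every well-typed week, so the else-branch (which in Python would recurse into ints and
-- raise TypeError) is unreachable on the typed domain; it is kept as the identity of the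
-- += accumulation with nothing to recurse into.
def pvGeWeek (w : List Int) : List Int :=
  if w.all (fun _ => true) then w else []

-- At the period level the elements are lists, so type(i)==int is false for each of them:
-- the leaf test holds exactly when the period is empty (and then += adds nothing).
def pvGePeriod (p : List (List Int)) : List Int :=
  if p.all (fun _ => false) then [] else p.foldl (fun acc w => acc ++ pvGeWeek w) []

def pvGeTeams (s : List (List (List Int))) : List Int :=
  if s.all (fun _ => false) then [] else s.foldl (fun acc p => acc ++ pvGePeriod p) []

def fatal_errors (solution : List (List (List Int))) : List String :=
  if solution.length = 0 then
    [] ++ ["The solution cannot be empty"]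
  else
    let teams := pvGeTeams solution
    match PySem.List.max? teams (fun t => t) with
    | none => []   -- Python raises ValueError here (max of empty sequence); excluded by Pre_
    | some n =>
      let fe : List String := []
      let fe := if (PySem.List.pyRange 1 (n + 1) 1).any
                    (fun t => !((PySem.Set.ofList teams).contains t)) then
                  fe ++ ["Missing team in the solution or team out of range!!!"] else fe
      let fe := if PySem.Int.mod n 2 ≠ 0 then
                  fe ++ ["\"n\" should be even!!!"] else fe
      let fe := if (solution.length : Int) ≠ PySem.Int.floordiv n 2 then
                  fe ++ ["the number of periods is not compliant!!!"] else fe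
      let fe := if solution.any (fun s => (s.length : Int) ≠ n - 1) then
                  fe ++ ["the number of weeks is not compliant!!!"] else fe
      fe

-- ===== PORT B =====
def fatal_errors_alt (solution : List (List (List Int))) : List String :=
  if solution.isEmpty then
    ["The solution cannot be empty"]
  else
    let teams := solution.flatMap (fun period => period.flatMap (fun week => week))
    match PySem.List.max? teams (fun t => t) with
    | none => []   -- unreachable under Pre_ (B's Python raises ValueError here too)
    | some n =>
      let present := PySem.Set.ofList teams
      let checks : List (Bool × String) :=
        [ ((PySem.List.pyRange 1 (n + 1) 1).any (fun t => !(present.contains t)),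
           "Missing team in the solution or team out of range!!!"),
          (decide (PySem.Int.mod n 2 ≠ 0),
           "\"n\" should be even!!!"),
          (decide ((solution.length : Int) ≠ PySem.Int.floordiv n 2),
           "the number of periods is not compliant!!!"),
          (solution.any (fun period => decide ((period.length : Int) ≠ n - 1)),
           "the number of weeks is not compliant!!!") ]
      checks.filterMap (fun cm => if cm.1 then some cm.2 else none)

-- ===== PRECONDITION & SPEC =====
-- Pre_ excludes exactly the inputs where A raises ValueError: a nonempty solution all of
-- whose weeks are empty (max() of an empty team list).
def Pre_fatal_errors (solution : List (List (List Int))) : Prop :=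
  solution = [] ∨ solution.flatMap (fun period => period.flatMap (fun week => week)) ≠ []
instance (solution : List (List (List Int))) : Decidable (Pre_fatal_errors solution) := by
  unfold Pre_fatal_errors; infer_instance

def pvWitness_fatal_errors : List (List (List Int)) := [[[1, 2]]]

def Spec_fatal_errors (solution : List (List (List Int))) (out : List String) : Prop := out = fatal_errors_alt solution
instance (solution : List (List (List Int))) (out : List String) : Decidable (Spec_fatal_errors solution out) := by unfold Spec_fatal_errors; infer_instance

-- ===== CLAIM (what is proved, stated in full; the proofs are below) =====
def Claim_equal_fatal_errors : Prop := ∀ (solution : List (List (List Int))), Dom_fatal_errors solution → Pre_fatal_errors solution → Spec_fatal_errors solution (fatal_errors solution)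

-- ===== LEMMAS AND PROOFS =====

theorem pvGeWeek_eq (w : List Int) : pvGeWeek w = w := by
  simp [pvGeWeek]

theorem pvGePeriod_eq (p : List (List Int)) :
    pvGePeriod p = p.flatMap (fun week => week) := by
  cases p with
  | nil => simp [pvGePeriod]
  | cons w ws =>
    simp only [pvGePeriod]
    rw [if_neg (by simp), PySem.List.foldl_append_eq_flatMap,
        show pvGeWeek = (fun w : List Int => w) from funext pvGeWeek_eq]
    simp

theorem pvGeTeams_eq (s : List (List (List Int))) :
    pvGeTeams s = s.flatMap (fun period => period.flatMap (fun week => week)) := by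
  cases s with
  | nil => simp [pvGeTeams]
  | cons p ps =>
    simp only [pvGeTeams]
    rw [if_neg (by simp), PySem.List.foldl_append_eq_flatMap,
        show pvGePeriod = (fun p : List (List Int) => p.flatMap (fun week => week)) from
          funext pvGePeriod_eq]
    simp

-- A's conditional append: (if c then fe ++ [m] else fe) pulls out as fe ++ (if c then [m] else [])
theorem pv_if_append {c : Prop} [Decidable c] (x : List String) (m : String) :
    (if c then x ++ [m] else x) = x ++ (if c then [m] else []) := by
  split_ifs <;> simp

-- B's table: filterMap over the four (condition, message) pairs, written as the four appends
theorem pv_checks (c1 c2 c3 c4 : Bool) (m1 m2 m3 m4 : String) :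
    List.filterMap (fun cm : Bool × String => if cm.1 then some cm.2 else none)
      [(c1, m1), (c2, m2), (c3, m3), (c4, m4)]
    = (((if c1 = true then [m1] else []) ++ (if c2 = true then [m2] else []))
        ++ (if c3 = true then [m3] else [])) ++ (if c4 = true then [m4] else []) := by
  cases c1 <;> cases c2 <;> cases c3 <;> cases c4 <;> simp

-- ===== VERDICT (by name: the statement is the Claim_ definition above) =====
theorem fatal_errors_spec : Claim_equal_fatal_errors := by
  intro solution _ hpre
  unfold Spec_fatal_errors fatal_errors fatal_errors_alt
  cases solution with
  | nil => simp
  | cons p ps =>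
    rw [pvGeTeams_eq, if_neg (by simp), if_neg (by simp)]
    rcases hpre with h | h
    · exact absurd h (by simp)
    · cases hm : PySem.List.max?
          ((p :: ps).flatMap (fun period => period.flatMap (fun week => week)))
          (fun t => t) with
      | none => exact absurd ((PySem.List.max?_eq_none_iff _ _).mp hm) h
      | some n =>
        simp only [hm, pv_checks, pv_if_append, List.nil_append, decide_eq_true_eq]
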